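-- pv_equiv track=rewrite | github.com/atharvakalele/GrowAI | Grow24_AI/marketplaces/amazon/seller_api/fba/po_generator.py | _next_po_tab_name
-- ===== SOURCE A (Python) =====
-- def _next_po_tab_name(existing_tabs: list[str], prefix: str) -> str:
--     """Find next available 'FBA PO N' tab name."""
--     used = set()
--     for t in existing_tabs:
--         if t.startswith(prefix + " "):
--             try:
--                 used.add(int(t[len(prefix)+1:].strip()))
--             except ValueError:
--                 pass
--     n = 1
--     while n in used:
--         n += 1
--     return f"{prefix} {n}"
-- ===== SOURCE B (Python) =====
-- def _next_po_tab_name(existing_tabs: list[str], prefix: str) -> str: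
--     """Find next available 'FBA PO N' tab name."""
--     nums = []
--     for t in existing_tabs:
--         if t.startswith(prefix + " "):
--             try:
--                 nums.append(int(t[len(prefix)+1:].strip()))
--             except ValueError:
--                 pass
--     expected = 1
--     for v in sorted(nums):
--         if v == expected:
--             expected += 1
--         elif v > expected:
--             break
--     return f"{prefix} {expected}"
-- ===== Notes on version B (the rewrite author's own statement) =====
-- stated objective: alternative
-- what changed: Replaces the set plus unbounded membership-probe while-loop with collecting the parsed numbers into a list, sorting it, and finding the smallest unused positive by a single ordered gap scan with an 'expected' counter.
import Mathlib
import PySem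

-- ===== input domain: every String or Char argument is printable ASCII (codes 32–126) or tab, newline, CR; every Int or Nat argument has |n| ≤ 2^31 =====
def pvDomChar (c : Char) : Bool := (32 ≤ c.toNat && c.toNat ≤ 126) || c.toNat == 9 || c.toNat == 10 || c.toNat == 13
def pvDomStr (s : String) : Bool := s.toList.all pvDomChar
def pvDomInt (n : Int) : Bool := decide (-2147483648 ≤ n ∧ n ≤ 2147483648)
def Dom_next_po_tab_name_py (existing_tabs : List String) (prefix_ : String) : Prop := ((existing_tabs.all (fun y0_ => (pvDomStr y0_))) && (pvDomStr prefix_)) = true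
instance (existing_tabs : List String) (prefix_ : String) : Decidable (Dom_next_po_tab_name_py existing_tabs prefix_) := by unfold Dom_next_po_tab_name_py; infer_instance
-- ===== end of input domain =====

-- B replaces A's set + membership-probe while-loop with sort + ordered gap scan (alternative algorithm).

-- shared helper: both Pythons contain the identical parsing expression
-- 'int(t[len(prefix)+1:].strip()) if t.startswith(prefix + " ")' (None = not a PO tab / ValueError)
def pvParse (prefix_ t : String) : Option Int :=
  if PySem.Str.startswith t (prefix_ ++ " ") then
    PySem.Int.ofStr? (PySem.Str.strip (PySem.Str.slice t (some (PySem.Str.len prefix_ + 1)) none))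
  else none

-- ===== PORT A =====
-- the 'while n in used: n += 1' loop, with enough fuel to reach the first free n
def pvWhileFree (used : PySem.Set Int) : Nat → Int → Int
  | 0, n => n
  | fuel + 1, n => if n ∈ used then pvWhileFree used fuel (n + 1) else n

def next_po_tab_name_py (existing_tabs : List String) (prefix_ : String) : String :=
  let used : PySem.Set Int :=
    existing_tabs.foldl (fun s t =>
      match pvParse prefix_ t with
      | some v => PySem.Set.add s v
      | none => s) []
  prefix_ ++ " " ++ PySem.Int.toStr (pvWhileFree used (used.length + 1) 1)

-- ===== PORT B =====
-- the ordered gap scan: skip values below expected, bump on a hit, break past a gap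
def pvGapScan : List Int → Int → Int
  | [], e => e
  | v :: rest, e =>
    if v = e then pvGapScan rest (e + 1)
    else if v > e then e
    else pvGapScan rest e

def next_po_tab_name_py_alt (existing_tabs : List String) (prefix_ : String) : String :=
  let nums : List Int :=
    existing_tabs.foldl (fun l t =>
      match pvParse prefix_ t with
      | some v => l ++ [v]
      | none => l) []
  prefix_ ++ " " ++ PySem.Int.toStr (pvGapScan (PySem.List.sorted nums (fun x => x)) 1)

-- ===== PRECONDITION & SPEC =====
def Spec_next_po_tab_name_py (existing_tabs : List String) (prefix_ : String) (out : String) : Prop := out = next_po_tab_name_py_alt existing_tabs prefix_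
instance (existing_tabs : List String) (prefix_ : String) (out : String) : Decidable (Spec_next_po_tab_name_py existing_tabs prefix_ out) := by unfold Spec_next_po_tab_name_py; infer_instance

-- ===== CLAIM (what is proved, stated in full; the proofs are below) =====
def Claim_equal_next_po_tab_name_py : Prop := ∀ (existing_tabs : List String) (prefix_ : String), Dom_next_po_tab_name_py existing_tabs prefix_ → Spec_next_po_tab_name_py existing_tabs prefix_ (next_po_tab_name_py existing_tabs prefix_)

-- ===== LEMMAS AND PROOFS =====

-- A's fold is Set.ofList of the parsed values
theorem pvFoldA_eq (prefix_ : String) (ts : List String) (s : PySem.Set Int) :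
    ts.foldl (fun s t =>
      match pvParse prefix_ t with
      | some v => PySem.Set.add s v
      | none => s) s
    = (ts.filterMap (pvParse prefix_)).foldl PySem.Set.add s := by
  induction ts generalizing s with
  | nil => rfl
  | cons t ts ih =>
    simp only [List.foldl_cons, List.filterMap_cons]
    cases pvParse prefix_ t <;> simp [ih]

-- B's fold collects exactly the parsed values
theorem pvFoldB_eq (prefix_ : String) (ts : List String) (l : List Int) :
    ts.foldl (fun l t =>
      match pvParse prefix_ t with
      | some v => l ++ [v]
      | none => l) l
    = l ++ ts.filterMap (pvParse prefix_) := by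
  induction ts generalizing l with
  | nil => simp
  | cons t ts ih =>
    simp only [List.foldl_cons, List.filterMap_cons]
    cases pvParse prefix_ t <;> simp [ih]

theorem pvFilterLen (L : List Int) (e : Int) :
    (L.filter (fun v => e ≤ v)).length = (L.filter (fun v => e + 1 ≤ v)).length + L.count e := by
  induction L with
  | nil => simp
  | cons v L ih =>
    simp only [List.filter_cons, List.count_cons]
    by_cases hv : v = e
    · subst hv; simp [ih]; omega
    · by_cases h1 : e ≤ v
      · have h2 : e + 1 ≤ v := by omega
        simp [h1, h2, hv, ih]; omega
      · have h2 : ¬ (e + 1 ≤ v) := by omega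
        simp [h1, h2, hv, ih]

-- A's while-loop finds the first n ≥ e not in used, given enough fuel
theorem pvWhileFree_spec (used : List Int) (hnd : used.Nodup) :
    ∀ (fuel : Nat) (e : Int), (used.filter (fun v => e ≤ v)).length < fuel →
      e ≤ pvWhileFree used fuel e ∧ pvWhileFree used fuel e ∉ used ∧
        ∀ m, e ≤ m → m < pvWhileFree used fuel e → m ∈ used := by
  intro fuel
  induction fuel with
  | zero => intro e h; omega
  | succ fuel ih =>
    intro e h
    by_cases he : e ∈ used
    · have hc : used.count e = 1 := List.count_eq_one_of_mem hnd he
      have hlt : (used.filter (fun v => e + 1 ≤ v)).length < fuel := by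
        have := pvFilterLen used e; omega
      have hrec := ih (e + 1) hlt
      have hstep : pvWhileFree used (fuel + 1) e = pvWhileFree used fuel (e + 1) := by
        simp [pvWhileFree, he]
      rw [hstep]
      have h1 := hrec.1
      refine ⟨by omega, hrec.2.1, ?_⟩
      intro m hm1 hm2
      by_cases hme : m = e
      · subst hme; exact he
      · exact hrec.2.2 m (by omega) hm2
    · have hstep : pvWhileFree used (fuel + 1) e = e := by
        simp [pvWhileFree, he]
      rw [hstep]
      exact ⟨le_refl e, he, fun m h1 h2 => by omega⟩

-- B's gap scan finds the first n ≥ e not in the (≤-sorted) list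
theorem pvGapScan_spec (s : List Int) (hs : s.Pairwise (· ≤ ·)) :
    ∀ e : Int, e ≤ pvGapScan s e ∧ pvGapScan s e ∉ s ∧
      ∀ m, e ≤ m → m < pvGapScan s e → m ∈ s := by
  induction s with
  | nil => intro e; simp [pvGapScan]
  | cons v rest ih =>
    intro e
    have hrest := ih (List.Pairwise.of_cons hs)
    by_cases hv : v = e
    · have hstep : pvGapScan (v :: rest) e = pvGapScan rest (e + 1) := by
        simp [pvGapScan, hv]
      have hr := hrest (e + 1)
      have hr1 := hr.1
      rw [hstep]
      refine ⟨by omega, ?_, ?_⟩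
      · simp only [List.mem_cons, not_or]
        exact ⟨by omega, hr.2.1⟩
      · intro m h1 h2
        by_cases hm : m = e
        · simp [hm, hv]
        · exact List.mem_cons_of_mem _ (hr.2.2 m (by omega) h2)
    · by_cases hgt : v > e
      · have hstep : pvGapScan (v :: rest) e = e := by
          simp [pvGapScan, hv, hgt]
        rw [hstep]
        refine ⟨le_refl e, ?_, fun m h1 h2 => by omega⟩
        simp only [List.mem_cons, not_or]
        constructor
        · omega
        · intro hmem
          have := (List.pairwise_cons.mp hs).1 e hmem
          omega
      · have hlt : v < e := by omega
        have hstep : pvGapScan (v :: rest) e = pvGapScan rest e := by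
          simp [pvGapScan, hv, hgt]
        have hr := hrest e
        have hr1 := hr.1
        rw [hstep]
        refine ⟨hr.1, ?_, ?_⟩
        · simp only [List.mem_cons, not_or]
          exact ⟨by omega, hr.2.1⟩
        · intro m h1 h2
          exact List.mem_cons_of_mem _ (hr.2.2 m h1 h2)

-- first-free is determined by membership alone
theorem pvFirstFree_unique (S T : List Int) (hmem : ∀ x, x ∈ S ↔ x ∈ T) (e r1 r2 : Int)
    (h1 : e ≤ r1 ∧ r1 ∉ S ∧ ∀ m, e ≤ m → m < r1 → m ∈ S)
    (h2 : e ≤ r2 ∧ r2 ∉ T ∧ ∀ m, e ≤ m → m < r2 → m ∈ T) : r1 = r2 := by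
  by_contra hne
  rcases lt_or_gt_of_ne hne with h | h
  · exact h1.2.1 ((hmem r1).mpr (h2.2.2 r1 h1.1 h))
  · exact h2.2.1 ((hmem r2).mp (h1.2.2 r2 h2.1 h))

-- ===== VERDICT (by name: the statement is the Claim_ definition above) =====
theorem next_po_tab_name_py_spec : Claim_equal_next_po_tab_name_py := by
  intro existing_tabs prefix_ _hdom
  unfold Spec_next_po_tab_name_py next_po_tab_name_py next_po_tab_name_py_alt
  simp only [pvFoldA_eq, pvFoldB_eq, List.nil_append]
  set nums := existing_tabs.filterMap (pvParse prefix_) with hnums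
  have hused : nums.foldl PySem.Set.add [] = PySem.Set.ofList nums :=
    (PySem.Set.ofList_eq_foldl nums).symm
  rw [hused]
  set used := PySem.Set.ofList nums with husedn
  have hnd : used.Nodup := PySem.Set.nodup_ofList nums
  have hfuel : (used.filter (fun v => (1:Int) ≤ v)).length < used.length + 1 := by
    have := List.length_filter_le (fun v => (1:Int) ≤ v) used
    omega
  have hA := pvWhileFree_spec used hnd (used.length + 1) 1 hfuel
  have hB := pvGapScan_spec (PySem.List.sorted nums (fun x => x))
    (PySem.List.sorted_pairwise nums (fun x => x)) 1
  have hmem : ∀ x : Int, x ∈ used ↔ x ∈ PySem.List.sorted nums (fun x => x) := by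
    intro x
    rw [PySem.Set.mem_ofList, PySem.List.mem_sorted]
  have := pvFirstFree_unique used (PySem.List.sorted nums (fun x => x)) hmem 1 _ _ hA hB
  rw [this]
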